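-- pv_equiv track=rewrite | github.com/jautschbach/nbotools | packages/generate_promolecule.py | create_new_dict
-- ===== SOURCE A (Python) =====
-- def create_new_dict(atom_orb_dict):
--     atom_basis_ind_tup = {}
--     start = 0
--     for atom, orbitals in atom_orb_dict.items():
--         atom_sym = ''.join(char for char in atom if char.isalpha())
--         atom_ind = ''.join(char for char in atom if char.isdigit())
--         new_key = atom_sym + '_' + atom_ind
--         end = start + len(orbitals)
--         atom_basis_ind_tup[new_key] = tuple(range(start, end))
--         start = end
--     return atom_basis_ind_tup
-- ===== SOURCE B (Python) =====
-- def create_new_dict(atom_orb_dict):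
--     keys = [''.join(c for c in atom if c.isalpha()) + '_' +
--             ''.join(c for c in atom if c.isdigit())
--             for atom in atom_orb_dict]
--     counts = [len(orbs) for orbs in atom_orb_dict.values()]
--     offsets = [0]
--     t = 0
--     for c in counts:
--         t += c
--         offsets.append(t)
--     return {k: tuple(range(s, e))
--             for k, (s, e) in zip(keys, zip(offsets, offsets[1:]))}
-- ===== Notes on version B (the rewrite author's own statement) =====
-- stated objective: alternative
-- what changed: A threads a running start offset through one dict-building loop; B first builds the reformatted keys and a prefix-sum offset table in separate passes, then zips each key with its consecutive (start, end) offset pair into the result dict.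
import Mathlib
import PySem

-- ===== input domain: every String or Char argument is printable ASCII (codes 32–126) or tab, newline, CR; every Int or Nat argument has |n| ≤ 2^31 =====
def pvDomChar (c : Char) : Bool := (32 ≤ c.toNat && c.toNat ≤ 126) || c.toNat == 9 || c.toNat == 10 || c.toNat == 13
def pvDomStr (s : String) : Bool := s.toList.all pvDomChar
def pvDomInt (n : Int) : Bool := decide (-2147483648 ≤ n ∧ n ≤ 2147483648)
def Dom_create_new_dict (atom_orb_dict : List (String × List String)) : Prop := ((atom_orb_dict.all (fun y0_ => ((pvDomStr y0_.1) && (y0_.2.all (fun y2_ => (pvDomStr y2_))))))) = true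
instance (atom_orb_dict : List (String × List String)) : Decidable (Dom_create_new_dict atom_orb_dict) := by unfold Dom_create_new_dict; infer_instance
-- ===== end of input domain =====

-- B replaces A's offset-threading loop by a two-phase prefix-sum decomposition (keys pass,
-- offset table, then a zip into the dict); same cost, alternative structure.

-- ===== PORT A =====
-- new_key = alpha-filtered chars + '_' + digit-filtered chars (exact on the ASCII domain)
def pvKey (atom : String) : String :=
  String.mk (atom.toList.filter PySem.Chars.isalpha ++ '_' :: atom.toList.filter PySem.Chars.isdigit)

def create_new_dict (atom_orb_dict : List (String × List String)) : List (String × List Int) :=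
  ((atom_orb_dict.foldl
      (fun (st : PySem.Dict String (List Int) × Int) p =>
        (st.1.insert (pvKey p.1) (PySem.List.pyRange st.2 (st.2 + (p.2.length : Int)) 1),
         st.2 + (p.2.length : Int)))
      (PySem.Dict.empty, 0)).1).items

-- ===== PORT B =====
def create_new_dict_alt (atom_orb_dict : List (String × List String)) : List (String × List Int) :=
  let keys := atom_orb_dict.map (fun p => pvKey p.1)
  let counts := atom_orb_dict.map (fun p => ((p.2.length : Int)))
  -- offsets = [0]; t = 0; for c in counts: t += c; offsets.append(t)
  let offsets := (counts.foldl (fun (st : List Int × Int) c => (st.1 ++ [st.2 + c], st.2 + c)) ([0], 0)).1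
  -- offsets[1:] with a nonnegative literal index = drop 1 (exact)
  ((keys.zip (offsets.zip (offsets.drop 1))).foldl
      (fun (d : PySem.Dict String (List Int)) kse =>
        d.insert kse.1 (PySem.List.pyRange kse.2.1 kse.2.2 1))
      PySem.Dict.empty).items

-- ===== PRECONDITION & SPEC =====
def Spec_create_new_dict (atom_orb_dict : List (String × List String)) (out : List (String × List Int)) : Prop := out = create_new_dict_alt atom_orb_dict
instance (atom_orb_dict : List (String × List String)) (out : List (String × List Int)) : Decidable (Spec_create_new_dict atom_orb_dict out) := by unfold Spec_create_new_dict; infer_instance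

-- ===== CLAIM (what is proved, stated in full; the proofs are below) =====
def Claim_equal_create_new_dict : Prop := ∀ (atom_orb_dict : List (String × List String)), Dom_create_new_dict atom_orb_dict → Spec_create_new_dict atom_orb_dict (create_new_dict atom_orb_dict)

-- ===== LEMMAS AND PROOFS =====

-- the sequence of (key, start, end) triples, written as a direct structural recursion
def pvTriples (xs : List (String × List String)) (s : Int) : List (String × (Int × Int)) :=
  match xs with
  | [] => []
  | p :: t => (pvKey p.1, (s, s + (p.2.length : Int))) :: pvTriples t (s + (p.2.length : Int))

-- the partial sums s+c₁, s+c₁+c₂, … of counts, starting after s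
def pvSums (cs : List Int) (s : Int) : List Int :=
  match cs with
  | [] => []
  | c :: t => (s + c) :: pvSums t (s + c)

theorem pvOffsets_eq (cs : List Int) (os : List Int) (s : Int) :
    (cs.foldl (fun (st : List Int × Int) c => (st.1 ++ [st.2 + c], st.2 + c)) (os, s)).1
      = os ++ pvSums cs s := by
  induction cs generalizing os s with
  | nil => simp [pvSums]
  | cons c t ih => simp [List.foldl, pvSums, ih]

theorem pvZip_eq (xs : List (String × List String)) (s : Int) :
    (xs.map (fun p => pvKey p.1)).zip
        ((s :: pvSums (xs.map (fun p => ((p.2.length : Int)))) s).zip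
          (pvSums (xs.map (fun p => ((p.2.length : Int)))) s))
      = pvTriples xs s := by
  induction xs generalizing s with
  | nil => simp [pvTriples]
  | cons p t ih => simp [pvSums, pvTriples, ih]

theorem pvFoldA_eq (xs : List (String × List String)) (d : PySem.Dict String (List Int)) (s : Int) :
    (xs.foldl
        (fun (st : PySem.Dict String (List Int) × Int) p =>
          (st.1.insert (pvKey p.1) (PySem.List.pyRange st.2 (st.2 + (p.2.length : Int)) 1),
           st.2 + (p.2.length : Int)))
        (d, s)).1
      = (pvTriples xs s).foldl
          (fun (d : PySem.Dict String (List Int)) kse =>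
            d.insert kse.1 (PySem.List.pyRange kse.2.1 kse.2.2 1)) d := by
  induction xs generalizing d s with
  | nil => simp [pvTriples]
  | cons p t ih => simp [List.foldl, pvTriples, ih]

-- ===== VERDICT (by name: the statement is the Claim_ definition above) =====
theorem create_new_dict_spec : Claim_equal_create_new_dict := by
  intro xs _
  show _ = _
  rw [create_new_dict, create_new_dict_alt]
  simp only [pvOffsets_eq, List.cons_append, List.nil_append, List.drop_succ_cons,
    List.drop_zero, pvZip_eq, pvFoldA_eq]
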